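-- pv_equiv track=rewrite | github.com/Azitt/Leetcode | second_round/Backtracking/backtracking.py | matchstick_rec
-- ===== SOURCE A (Python) =====
-- def matchstick_rec(four_side_length,match_sort,target_slength,index_matches,index_slength):
--     if index_matches==(len(match_sort)):
--         return all(side==target_slength for side in four_side_length)
--     for i in range(4):
--      if (four_side_length[i] + match_sort[index_matches])<= target_slength:
--          four_side_length[i] += match_sort[index_matches]
--          if matchstick_rec(four_side_length,match_sort,target_slength,index_matches+1,i):
--              return True
--          four_side_length[i] -= match_sort[index_matches]
--     return False
-- ===== SOURCE B (Python) =====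
-- def matchstick_rec(four_side_length, match_sort, target_slength, index_matches, index_slength):
--     # Forward set-DP: sweep the remaining sticks once, keeping the set of
--     # reachable side-length configurations (duplicates merged).
--     states = {tuple(four_side_length)}
--     for i in range(index_matches, len(match_sort)):
--         stick = match_sort[i]
--         nxt = set()
--         for st in states:
--             for j in range(4):
--                 if st[j] + stick <= target_slength:
--                     nxt.add(st[:j] + (st[j] + stick,) + st[j + 1:])
--         states = nxt
--     return any(all(s == target_slength for s in st) for st in states)
-- ===== Notes on version B (the rewrite author's own statement) =====
-- stated objective: alternative
-- what changed: Replaced the depth-first 4-way backtracking over individual assignment paths by a forward set-DP: one sweep of the stick cursor maintaining the deduplicated set of reachable side-length configurations, then a membership test; Pre_ excludes cursors outside [-len, len] (A raises IndexError or RecursionError) and short side lists with sticks remaining (A normally raises IndexError, except when a branch happens to succeed before the bad index is reached, an accident of A's search order).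
-- outside the precondition, e.g. on matchstick_rec([0], [1], 1, 0, 0): A returns True, B raises IndexError
import Mathlib
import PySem

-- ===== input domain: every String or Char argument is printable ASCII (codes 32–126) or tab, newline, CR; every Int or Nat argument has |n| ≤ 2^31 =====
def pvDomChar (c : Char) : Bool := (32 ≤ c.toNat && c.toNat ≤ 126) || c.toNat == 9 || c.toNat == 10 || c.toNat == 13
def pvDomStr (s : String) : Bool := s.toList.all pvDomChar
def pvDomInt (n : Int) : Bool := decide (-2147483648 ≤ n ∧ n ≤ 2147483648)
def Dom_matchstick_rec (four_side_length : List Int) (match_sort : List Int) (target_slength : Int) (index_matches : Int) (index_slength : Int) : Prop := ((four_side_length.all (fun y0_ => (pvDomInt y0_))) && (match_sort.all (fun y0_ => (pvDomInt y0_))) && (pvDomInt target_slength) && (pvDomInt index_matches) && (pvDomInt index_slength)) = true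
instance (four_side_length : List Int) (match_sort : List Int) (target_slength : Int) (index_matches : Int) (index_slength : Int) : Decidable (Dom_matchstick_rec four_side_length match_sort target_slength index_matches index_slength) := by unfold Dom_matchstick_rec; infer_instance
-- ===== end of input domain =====

-- B replaces A's depth-first 4-way backtracking over stick assignments by a forward set-DP over the
-- set of reachable side-length configurations (one pass over the remaining sticks, duplicates merged).
-- Return values only: Python A mutates four_side_length in place (and leaves it grown when it
-- returns True); B does not mutate its arguments.

-- ===== PORT A =====
-- Fueled transliteration of A's recursion: fuel 2 * match_sort.length + 1 bounds the recursion
-- depth, always sufficient under Pre_ (-len ≤ index_matches ≤ len); fuel 0 is unreachable there.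
-- four_side_length[i] for i ∈ {0,1,2,3}: getD's default is reached only when the list is shorter
-- than 4 (Python IndexError, excluded by Pre_); match_sort[index_matches] is pyGetD (in range under
-- Pre_ in the branch that reads it). The for-loop with in-place add / recurse / early return True /
-- subtract-back is, state being restored on every failed branch, exactly the short-circuit `any`
-- over i = 0,1,2,3 of "fits ∧ recursion with the updated list succeeds", in the same order.
def mrecA : Nat → List Int → List Int → Int → Int → Bool
  | 0, _, _, _, _ => false
  | fuel+1, fsl, ms, t, idx =>
    if idx = (ms.length : Int) then
      fsl.all (fun side => side == t)
    else
      ([0, 1, 2, 3] : List Nat).any (fun i =>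
        decide (fsl.getD i 0 + PySem.List.pyGetD ms idx 0 ≤ t) &&
          mrecA fuel (fsl.set i (fsl.getD i 0 + PySem.List.pyGetD ms idx 0)) ms t (idx + 1))

def matchstick_rec (four_side_length : List Int) (match_sort : List Int) (target_slength : Int) (index_matches : Int) (index_slength : Int) : Bool :=
  mrecA (2 * match_sort.length + 1) four_side_length match_sort target_slength index_matches

-- ===== PORT B =====
-- inner loop of B: for j in range(4): if st[j] + stick <= target: nxt.add(st with st[j] + stick)
-- (st[j] as getD: the default is reached only outside Pre_, where the Python raises IndexError)
def movesB (t m : Int) (acc : PySem.Set (List Int)) (st : List Int) : PySem.Set (List Int) :=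
  ([0, 1, 2, 3] : List Nat).foldl (fun a i =>
    if st.getD i 0 + m ≤ t then PySem.Set.add a (st.set i (st.getD i 0 + m)) else a) acc

-- one stick of B's outer loop: nxt = set(); for st in states: …; states = nxt
def stepB (t : Int) (states : PySem.Set (List Int)) (m : Int) : PySem.Set (List Int) :=
  states.foldl (fun a st => movesB t m a st) PySem.Set.empty

-- for i in range(index_matches, len(match_sort)): stick = match_sort[i] — pyRange + pyGetD
-- (Python indexing incl. negative wrap; the default is reached only outside Pre_, IndexError there)
def matchstick_rec_alt (four_side_length : List Int) (match_sort : List Int) (target_slength : Int) (index_matches : Int) (index_slength : Int) : Bool :=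
  let states := (PySem.List.pyRange index_matches match_sort.length).foldl
      (fun s i => stepB target_slength s (PySem.List.pyGetD match_sort i 0))
      (PySem.Set.ofList [four_side_length])
  states.any (fun st => st.all (fun s => s == target_slength))

-- ===== PRECONDITION & SPEC =====
-- Pre_ is exactly where Python A returns: the cursor must satisfy -len ≤ index_matches ≤
-- len(match_sort) (below -len A's match_sort[index_matches] is an IndexError; above len A recurses
-- past the list forever, RecursionError), and while sticks remain the list must have the four sides
-- both programs index (with fewer, both normally raise IndexError; only if a branch happens to
-- succeed before the bad index is reached does A still return True while B raises — a corner where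
-- A's answer hinges on IndexError-vs-success race, excluded here).
def Pre_matchstick_rec (four_side_length : List Int) (match_sort : List Int) (target_slength : Int) (index_matches : Int) (index_slength : Int) : Prop :=
  -(match_sort.length : Int) ≤ index_matches ∧ index_matches ≤ match_sort.length ∧
    (index_matches < match_sort.length → 4 ≤ four_side_length.length)
instance (four_side_length : List Int) (match_sort : List Int) (target_slength : Int) (index_matches : Int) (index_slength : Int) : Decidable (Pre_matchstick_rec four_side_length match_sort target_slength index_matches index_slength) := by unfold Pre_matchstick_rec; infer_instance

def pvWitness_matchstick_rec : List Int × List Int × Int × Int × Int := ([0, 0, 0, 0], [1, 1, 1, 1], 1, 0, 0)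

def Spec_matchstick_rec (four_side_length : List Int) (match_sort : List Int) (target_slength : Int) (index_matches : Int) (index_slength : Int) (out : Bool) : Prop := out = matchstick_rec_alt four_side_length match_sort target_slength index_matches index_slength
instance (four_side_length : List Int) (match_sort : List Int) (target_slength : Int) (index_matches : Int) (index_slength : Int) (out : Bool) : Decidable (Spec_matchstick_rec four_side_length match_sort target_slength index_matches index_slength out) := by unfold Spec_matchstick_rec; infer_instance

-- ===== CLAIM (what is proved, stated in full; the proofs are below) =====
def Claim_equal_matchstick_rec : Prop := ∀ (four_side_length : List Int) (match_sort : List Int) (target_slength : Int) (index_matches : Int) (index_slength : Int), Dom_matchstick_rec four_side_length match_sort target_slength index_matches index_slength → Pre_matchstick_rec four_side_length match_sort target_slength index_matches index_slength → Spec_matchstick_rec four_side_length match_sort target_slength index_matches index_slength (matchstick_rec four_side_length match_sort target_slength index_matches index_slength)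

-- ===== LEMMAS AND PROOFS =====

-- shared semantics of both programs: feasibility of placing the remaining sticks, by structural
-- recursion on the stick list
def reachA (t : Int) : List Int → List Int → Bool
  | [], fsl => fsl.all (fun s => s == t)
  | m :: rest, fsl =>
    ([0, 1, 2, 3] : List Nat).any (fun i =>
      decide (fsl.getD i 0 + m ≤ t) && reachA t rest (fsl.set i (fsl.getD i 0 + m)))

lemma any_congr_mem {β : Type} (l : List β) (f g : β → Bool) (h : ∀ i ∈ l, f i = g i) :
    l.any f = l.any g := by
  induction l with
  | nil => rfl
  | cons a l ih =>
    simp only [List.any_cons, h a List.mem_cons_self,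
      ih (fun i hi => h i (List.mem_cons_of_mem _ hi))]

-- the sticks A's cursor walks over: match_sort[i] for i = idx, idx+1, …, len-1 (Python indexing)
def sticksFrom (ms : List Int) (idx : Int) : List Int :=
  (PySem.List.pyRange idx ms.length).map (fun j => PySem.List.pyGetD ms j 0)

-- A's fueled recursion computes reachA of the sticks its cursor has not yet passed
lemma mrecA_eq_reachA : ∀ (fuel : Nat) (idx : Int) (fsl ms : List Int) (t : Int),
    idx ≤ ms.length → (ms.length - idx).toNat < fuel →
    mrecA fuel fsl ms t idx = reachA t (sticksFrom ms idx) fsl := by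
  intro fuel
  induction fuel with
  | zero => intro idx fsl ms t hk hf; omega
  | succ fuel ih =>
    intro idx fsl ms t hk hf
    by_cases hk' : idx = (ms.length : Int)
    · rw [hk']
      simp [mrecA, sticksFrom, PySem.List.pyRange_one_eq_nil (le_refl _), reachA]
    · have hlt : idx < (ms.length : Int) := lt_of_le_of_ne hk hk'
      rw [show sticksFrom ms idx = PySem.List.pyGetD ms idx 0 :: sticksFrom ms (idx + 1) by
        unfold sticksFrom; rw [PySem.List.pyRange_one_cons hlt, List.map_cons]]
      simp only [mrecA, if_neg hk', reachA]
      refine any_congr_mem _ _ _ (fun i _ => ?_)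
      rw [ih (idx + 1) _ ms t (by omega) (by omega)]

-- membership in an "add-if" fold (the shape of B's inner loop)
lemma mem_foldl_addIf {α β : Type} [BEq α] [LawfulBEq α] (l : List β) (c : β → Prop)
    [DecidablePred c] (f : β → α) (acc : PySem.Set α) (x : α) :
    x ∈ l.foldl (fun a i => if c i then PySem.Set.add a (f i) else a) acc ↔
      x ∈ acc ∨ ∃ i ∈ l, c i ∧ x = f i := by
  induction l generalizing acc with
  | nil => simp
  | cons hd tl ih =>
    simp only [List.foldl_cons]
    by_cases h : c hd
    · simp [h, ih, PySem.Set.mem_add]; tauto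
    · simp [h, ih]

lemma mem_movesB (t m : Int) (acc : PySem.Set (List Int)) (st x : List Int) :
    x ∈ movesB t m acc st ↔
      x ∈ acc ∨ ∃ i ∈ ([0, 1, 2, 3] : List Nat),
        st.getD i 0 + m ≤ t ∧ x = st.set i (st.getD i 0 + m) := by
  unfold movesB
  exact mem_foldl_addIf _ _ _ _ _

-- the set built for one stick holds exactly the one-stick successors of the previous states
lemma mem_stepB (t m : Int) (S : List (List Int)) (x : List Int) :
    x ∈ stepB t S m ↔
      ∃ st ∈ S, ∃ i ∈ ([0, 1, 2, 3] : List Nat),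
        st.getD i 0 + m ≤ t ∧ x = st.set i (st.getD i 0 + m) := by
  unfold stepB
  suffices h : ∀ (acc : PySem.Set (List Int)),
      x ∈ S.foldl (fun a st => movesB t m a st) acc ↔
        x ∈ acc ∨ ∃ st ∈ S, ∃ i ∈ ([0, 1, 2, 3] : List Nat),
          st.getD i 0 + m ≤ t ∧ x = st.set i (st.getD i 0 + m) by
    rw [h]; simp [PySem.Set.empty]
  induction S with
  | nil => simp
  | cons hd tl ih =>
    intro acc
    simp only [List.foldl_cons]
    rw [ih, mem_movesB]
    simp only [List.mem_cons]
    constructor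
    · rintro ((h|⟨i,hi,hc,hx⟩)|⟨st,hst,rest⟩)
      · exact Or.inl h
      · exact Or.inr ⟨hd, Or.inl rfl, i, hi, hc, hx⟩
      · exact Or.inr ⟨st, Or.inr hst, rest⟩
    · rintro (h|⟨st,(rfl|hst),rest⟩)
      · exact Or.inl (Or.inl h)
      · exact Or.inl (Or.inr rest)
      · exact Or.inr ⟨st, hst, rest⟩

-- B's whole forward pass: some final state is all-target iff some initial state reaches the target
lemma any_foldl_stepB (t : Int) : ∀ (L : List Int) (S : List (List Int)),
    (L.foldl (stepB t) S).any (fun st => st.all (fun s => s == t)) =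
      S.any (fun st => reachA t L st) := by
  intro L
  induction L with
  | nil => intro S; simp [reachA]
  | cons m L ih =>
    intro S
    simp only [List.foldl_cons]
    rw [ih, Bool.eq_iff_iff]
    simp only [List.any_eq_true]
    constructor
    · rintro ⟨x, hx, hr⟩
      rw [mem_stepB] at hx
      obtain ⟨st, hst, i, hi, hc, rfl⟩ := hx
      refine ⟨st, hst, ?_⟩
      simp only [reachA, List.any_eq_true, Bool.and_eq_true, decide_eq_true_eq]
      exact ⟨i, hi, hc, hr⟩
    · rintro ⟨st, hst, hr⟩
      simp only [reachA, List.any_eq_true, Bool.and_eq_true, decide_eq_true_eq] at hr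
      obtain ⟨i, hi, hc, hr⟩ := hr
      exact ⟨st.set i (st.getD i 0 + m), (mem_stepB t m S _).2 ⟨st, hst, i, hi, hc, rfl⟩, hr⟩

lemma ports_agree (fsl ms : List Int) (t idx : Int) (h0 : -(ms.length : Int) ≤ idx) (hle : idx ≤ ms.length) :
    mrecA (2 * ms.length + 1) fsl ms t idx =
      ((PySem.List.pyRange idx ms.length).foldl
          (fun s i => stepB t s (PySem.List.pyGetD ms i 0))
          (PySem.Set.ofList [fsl])).any
            (fun st => st.all (fun s => s == t)) := by
  rw [mrecA_eq_reachA (2 * ms.length + 1) idx fsl ms t hle (by omega)]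
  rw [← List.foldl_map,
    PySem.Set.ofList_eq_self_of_nodup _ (List.nodup_singleton _),
    show ((PySem.List.pyRange idx ms.length).map (fun j => PySem.List.pyGetD ms j 0))
      = sticksFrom ms idx from rfl,
    any_foldl_stepB]
  simp only [List.any_cons, List.any_nil, Bool.or_false]

-- ===== VERDICT (by name: the statement is the Claim_ definition above) =====
theorem matchstick_rec_spec : Claim_equal_matchstick_rec := by
  intro fsl ms t idx isl _ hpre
  unfold Spec_matchstick_rec matchstick_rec matchstick_rec_alt
  exact ports_agree fsl ms t idx hpre.1 hpre.2.1
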